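-- pv_equiv track=rewrite | github.com/rose-giant/AI-Audio-Preprocessing | adada.py | clusterAudioFiles
-- ===== SOURCE A (Python) =====
-- DICT_NUM_KEY = "number"
--
-- DICT_NAME_KEY = "fileName"
--
-- def clusterAudioFiles(dataFileNames):
--     dictList = []
--     for i in range(10):
--         for file in dataFileNames:
--             if file.startswith(str(i) + "_"):
--                 fileNumberGroupDictionary = {}
--                 fileNumberGroupDictionary[DICT_NUM_KEY] = str(i)
--                 fileNumberGroupDictionary[DICT_NAME_KEY] = file
--                 dictList.append(fileNumberGroupDictionary)
--
--     return dictList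
-- ===== SOURCE B (Python) =====
-- DICT_NUM_KEY = "number"
--
-- DICT_NAME_KEY = "fileName"
--
-- def _classify(file):
--     if len(file) >= 2 and file[1] == "_" and "0" <= file[0] <= "9":
--         return ord(file[0]) - ord("0")
--     return None
--
-- def clusterAudioFiles(dataFileNames):
--     buckets = [[] for _ in range(10)]
--     for file in dataFileNames:
--         d = _classify(file)
--         if d is not None:
--             buckets[d].append(file)
--     out = []
--     for d in range(10):
--         for f in buckets[d]:
--             out.append({DICT_NUM_KEY: str(d), DICT_NAME_KEY: f})
--     return out
-- ===== Notes on version B (the rewrite author's own statement) =====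
-- stated objective: faster
-- what changed: A scans the whole file list once per digit (10 passes, nested loops); B classifies each file once in a single pass into 10 digit buckets and then emits the buckets in digit order.
import Mathlib
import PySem

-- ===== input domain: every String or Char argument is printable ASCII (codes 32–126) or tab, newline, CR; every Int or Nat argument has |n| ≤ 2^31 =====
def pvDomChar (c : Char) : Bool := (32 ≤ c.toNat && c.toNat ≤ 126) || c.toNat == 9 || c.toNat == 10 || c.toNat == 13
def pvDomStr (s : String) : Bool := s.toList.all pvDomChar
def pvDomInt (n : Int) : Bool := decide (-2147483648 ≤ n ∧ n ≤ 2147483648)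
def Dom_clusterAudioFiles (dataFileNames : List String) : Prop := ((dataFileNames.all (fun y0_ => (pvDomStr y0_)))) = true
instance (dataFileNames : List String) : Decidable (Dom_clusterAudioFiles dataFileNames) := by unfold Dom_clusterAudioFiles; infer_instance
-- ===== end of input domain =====

-- B replaces A's 10 scans of the input (one filter pass per digit) by a single bucketing pass; objective: a single-pass alternative.

-- ===== PORT A =====
-- the dict build '{}; d[DICT_NUM_KEY]=str(i); d[DICT_NAME_KEY]=file' is ported as PySem.Dict inserts, returned as its items list
def clusterAudioFiles (dataFileNames : List String) : List (List (String × String)) :=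
  (PySem.List.pyRange 0 10 1).foldl (fun dictList i =>
    dataFileNames.foldl (fun dictList file =>
      if PySem.Str.startswith file (PySem.Int.toStr i ++ "_") then
        dictList ++ [(((PySem.Dict.mk ([] : List (String × String))).insert "number" (PySem.Int.toStr i)).insert "fileName" file).items]
      else dictList) dictList) []

-- ===== PORT B =====
-- _classify(file): its digit index when the name is '<digit>_…', else None (string test done on the char list, exact for all strings)
def pvClassifyChars (cs : List Char) : Option Nat :=
  match cs with
  | c0 :: c1 :: _ =>
      if c1 = '_' ∧ '0' ≤ c0 ∧ c0 ≤ '9' then some (c0.toNat - 48) else none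
  | _ => none

def pvClassify (file : String) : Option Nat := pvClassifyChars file.toList

def clusterAudioFiles_alt (dataFileNames : List String) : List (List (String × String)) :=
  let buckets := dataFileNames.foldl (fun buckets file =>
      match pvClassify file with
      | some d => buckets.set d (buckets.getD d [] ++ [file])
      | none => buckets) (List.replicate 10 [])
  (List.range 10).flatMap (fun d =>
    (buckets.getD d []).map (fun f => [("number", PySem.Int.toStr (d : Int)), ("fileName", f)]))

-- ===== PRECONDITION & SPEC =====
def Spec_clusterAudioFiles (dataFileNames : List String) (out : List (List (String × String))) : Prop := out = clusterAudioFiles_alt dataFileNames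
instance (dataFileNames : List String) (out : List (List (String × String))) : Decidable (Spec_clusterAudioFiles dataFileNames out) := by unfold Spec_clusterAudioFiles; infer_instance

-- ===== CLAIM (what is proved, stated in full; the proofs are below) =====
def Claim_equal_clusterAudioFiles : Prop := ∀ (dataFileNames : List String), Dom_clusterAudioFiles dataFileNames → Spec_clusterAudioFiles dataFileNames (clusterAudioFiles dataFileNames)

-- ===== LEMMAS AND PROOFS =====

-- the per-digit predicate both programs decide, as a Bool
def pvIsDigitFile (d : Nat) (file : String) : Bool := pvClassify file == some d

lemma char_le_toNat {a b : Char} (h : a ≤ b) : a.toNat ≤ b.toNat := by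
  rw [Char.le_def] at h
  exact UInt32.le_iff_toNat_le.mp h

lemma char_eq_of_toNat {a b : Char} (h : a.toNat = b.toNat) : a = b := by
  apply Char.ext
  exact UInt32.toNat_inj.mp h

lemma pvClassify_lt_ten {file : String} {d : Nat} (h : pvClassify file = some d) : d < 10 := by
  unfold pvClassify pvClassifyChars at h
  split at h
  · split at h
    · rename_i c0 c1 _ hcond
      obtain ⟨-, h0, h9⟩ := hcond
      have h0' := char_le_toNat h0
      have h9' := char_le_toNat h9
      have h48 : ('0' : Char).toNat = 48 := by decide
      have h57 : ('9' : Char).toNat = 57 := by decide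
      have := Option.some.inj h
      omega
    · exact absurd h (by simp)
  · exact absurd h (by simp)

-- A's test equals B's, a digit at a time: startswith(cs, [dc,'_']) ↔ classify cs = d, for dc the char of digit d
lemma startswith_digit (dc : Char) (d : Nat) (hdc : dc.toNat = 48 + d) (hd : d < 10)
    (h0 : '0' ≤ dc) (h9 : dc ≤ '9') (cs : List Char) :
    PySem.Chars.startswith cs [dc, '_'] = (pvClassifyChars cs == some d) := by
  match cs with
  | [] => simp [PySem.Chars.startswith, List.isPrefixOf, pvClassifyChars]
  | [c] => simp [PySem.Chars.startswith, List.isPrefixOf, pvClassifyChars]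
  | c0 :: c1 :: rest =>
    simp only [PySem.Chars.startswith, List.isPrefixOf, pvClassifyChars]
    split_ifs with hc
    · obtain ⟨h1, h0, h9⟩ := hc
      subst h1
      have h0' := char_le_toNat h0
      have h9' := char_le_toNat h9
      have h48 : ('0' : Char).toNat = 48 := by decide
      have h57 : ('9' : Char).toNat = 57 := by decide
      rw [Bool.eq_iff_iff]
      simp only [Bool.and_eq_true, beq_iff_eq, Option.some.injEq, and_true]
      constructor
      · intro hde
        subst hde
        omega
      · intro hde
        apply char_eq_of_toNat
        omega
    · rw [Bool.eq_iff_iff]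
      simp only [Bool.and_eq_true, beq_iff_eq]
      constructor
      · rintro ⟨rfl, rfl, -⟩
        exact absurd ⟨rfl, h0, h9⟩ hc
      · simp

-- B's single bucketing pass, named for the invariant proof
def pvFold (xs : List String) (buckets : List (List String)) : List (List String) :=
  xs.foldl (fun buckets file =>
      match pvClassify file with
      | some d => buckets.set d (buckets.getD d [] ++ [file])
      | none => buckets) buckets

-- bucket invariant: after the pass, bucket d holds exactly the digit-d files in input order
lemma pvFold_getD (xs : List String) (buckets : List (List String))
    (hlen : buckets.length = 10) (d : Nat) (hd : d < 10) :
    (pvFold xs buckets).getD d [] = buckets.getD d [] ++ xs.filter (pvIsDigitFile d) := by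
  induction xs generalizing buckets with
  | nil => simp [pvFold]
  | cons x xs ih =>
      unfold pvFold
      simp only [List.foldl_cons]
      cases h : pvClassify x with
      | none =>
          rw [show (List.foldl _ buckets xs : List (List String)) = pvFold xs buckets from rfl,
            ih buckets hlen]
          simp [pvIsDigitFile, h]
      | some e =>
          have he : e < 10 := pvClassify_lt_ten h
          rw [show (List.foldl _ _ xs : List (List String)) = pvFold xs (buckets.set e (buckets.getD e [] ++ [x])) from rfl,
            ih _ (by simp [hlen])]
          by_cases hde : d = e
          · subst hde
            simp [pvIsDigitFile, h, List.getD, hlen, hd]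
          · simp [pvIsDigitFile, h, List.getD,
              List.getElem?_set_ne (show e ≠ d by omega), (show ¬ e = d by omega)]

-- A's inner loop over the file list is 'filter then map', by the library loop-shape lemma
lemma A_inner (xs : List String) (i : Int) (acc : List (List (String × String))) :
    xs.foldl (fun dictList file =>
      if PySem.Str.startswith file (PySem.Int.toStr i ++ "_") then
        dictList ++ [(((PySem.Dict.mk ([] : List (String × String))).insert "number" (PySem.Int.toStr i)).insert "fileName" file).items]
      else dictList) acc
    = acc ++ (xs.filter (fun file => PySem.Str.startswith file (PySem.Int.toStr i ++ "_"))).map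
        (fun file => [("number", PySem.Int.toStr i), ("fileName", file)]) := by
  rw [PySem.List.foldl_append_if
    (fun file => PySem.Str.startswith file (PySem.Int.toStr i ++ "_"))
    (fun file => (((PySem.Dict.mk ([] : List (String × String))).insert "number" (PySem.Int.toStr i)).insert "fileName" file).items)]
  rfl

-- per digit, A's filtered sublist is B's bucket content
lemma filter_eq (xs : List String) (d : Nat) (hd : d < 10) :
    xs.filter (fun file => PySem.Str.startswith file (PySem.Int.toStr (d : Int) ++ "_"))
      = xs.filter (pvIsDigitFile d) := by
  apply List.filter_congr
  intro f _
  rw [PySem.Str.startswith_eq]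
  have hlist : (PySem.Int.toStr (d : Int) ++ "_").toList = [Char.ofNat (48 + d), '_'] := by
    interval_cases d <;> decide
  rw [hlist]
  exact startswith_digit _ d (by interval_cases d <;> decide) hd (by interval_cases d <;> decide) (by interval_cases d <;> decide) f.toList

-- ===== VERDICT (by name: the statement is the Claim_ definition above) =====
theorem clusterAudioFiles_spec : Claim_equal_clusterAudioFiles := by
  intro xs _
  show clusterAudioFiles xs = clusterAudioFiles_alt xs
  unfold clusterAudioFiles clusterAudioFiles_alt
  rw [show PySem.List.pyRange 0 10 1 = [0,1,2,3,4,5,6,7,8,9] from rfl]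
  simp only [List.foldl_cons, List.foldl_nil, A_inner]
  rw [show List.range 10 = [0,1,2,3,4,5,6,7,8,9] from rfl]
  simp only [List.flatMap_cons, List.flatMap_nil]
  rw [show (xs.foldl (fun buckets file =>
      match pvClassify file with
      | some d => buckets.set d (buckets.getD d [] ++ [file])
      | none => buckets) (List.replicate 10 []) : List (List String)) = pvFold xs (List.replicate 10 []) from rfl]
  have hb : ∀ d : Nat, d < 10 → (pvFold xs (List.replicate 10 [])).getD d [] = xs.filter (pvIsDigitFile d) := by
    intro d hd
    rw [pvFold_getD xs _ (by simp) d hd]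
    interval_cases d <;> rfl
  rw [hb 0 (by omega), hb 1 (by omega), hb 2 (by omega), hb 3 (by omega), hb 4 (by omega),
    hb 5 (by omega), hb 6 (by omega), hb 7 (by omega), hb 8 (by omega), hb 9 (by omega)]
  rw [show xs.filter (fun file => PySem.Str.startswith file (PySem.Int.toStr 0 ++ "_")) = xs.filter (pvIsDigitFile 0) by simpa using filter_eq xs 0 (by omega),
    show xs.filter (fun file => PySem.Str.startswith file (PySem.Int.toStr 1 ++ "_")) = xs.filter (pvIsDigitFile 1) by simpa using filter_eq xs 1 (by omega),
    show xs.filter (fun file => PySem.Str.startswith file (PySem.Int.toStr 2 ++ "_")) = xs.filter (pvIsDigitFile 2) by simpa using filter_eq xs 2 (by omega),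
    show xs.filter (fun file => PySem.Str.startswith file (PySem.Int.toStr 3 ++ "_")) = xs.filter (pvIsDigitFile 3) by simpa using filter_eq xs 3 (by omega),
    show xs.filter (fun file => PySem.Str.startswith file (PySem.Int.toStr 4 ++ "_")) = xs.filter (pvIsDigitFile 4) by simpa using filter_eq xs 4 (by omega),
    show xs.filter (fun file => PySem.Str.startswith file (PySem.Int.toStr 5 ++ "_")) = xs.filter (pvIsDigitFile 5) by simpa using filter_eq xs 5 (by omega),
    show xs.filter (fun file => PySem.Str.startswith file (PySem.Int.toStr 6 ++ "_")) = xs.filter (pvIsDigitFile 6) by simpa using filter_eq xs 6 (by omega),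
    show xs.filter (fun file => PySem.Str.startswith file (PySem.Int.toStr 7 ++ "_")) = xs.filter (pvIsDigitFile 7) by simpa using filter_eq xs 7 (by omega),
    show xs.filter (fun file => PySem.Str.startswith file (PySem.Int.toStr 8 ++ "_")) = xs.filter (pvIsDigitFile 8) by simpa using filter_eq xs 8 (by omega),
    show xs.filter (fun file => PySem.Str.startswith file (PySem.Int.toStr 9 ++ "_")) = xs.filter (pvIsDigitFile 9) by simpa using filter_eq xs 9 (by omega)]
  norm_num
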